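-- pv_equiv track=rewrite | github.com/hyeonbin123/CordingTest | baekjoon/16566.py | solve_card_game
-- ===== SOURCE A (Python) =====
-- class DisjointSet:
--     def __init__(self, n):
--         self.parent = list(range(n + 1))
--
--     def find(self, x):
--         if self.parent[x] != x:
--             self.parent[x] = self.find(self.parent[x])
--         return self.parent[x]
--
--     def union(self, x, y):
--         self.parent[self.find(x)] = self.find(y)
--
-- def solve_card_game(N, M, K, minsu_cards, chulsu_cards):
--     cards = sorted(set(minsu_cards))
--     card_indices = {card: i for i, card in enumerate(cards)}
--
--     disjoint_set = DisjointSet(len(cards))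
--
--     results = []
--     for chulsu_card in chulsu_cards:
--         index = binary_search(cards, chulsu_card)
--
--         if index < len(cards):
--             root = disjoint_set.find(index)
--             card = cards[root]
--             results.append(card)
--
--             if root + 1 < len(cards):
--                 disjoint_set.union(root, root + 1)
--         else:
--             root = disjoint_set.find(0)
--             card = cards[root]
--             results.append(card)
--
--             if root + 1 < len(cards):
--                 disjoint_set.union(root, root + 1)
--
--     return results
--
-- def binary_search(arr, target):
--     left, right = 0, len(arr) - 1
--     while left <= right:
--         mid = (left + right) // 2
--         if arr[mid] <= target:
--             left = mid + 1
--         else: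
--             right = mid - 1
--     return left
-- ===== SOURCE B (Python) =====
-- from bisect import bisect_right
--
-- def solve_card_game(N, M, K, minsu_cards, chulsu_cards):
--     # Shrinking sorted list of available non-maximum cards; the maximum card
--     # acts as a reusable ceiling (A's disjoint set never retires the last index).
--     cards = sorted(set(minsu_cards))
--     top = cards[-1] if cards else None
--     avail = cards[:-1]
--     results = []
--     for q in chulsu_cards:
--         i = bisect_right(avail, q) if q < top else 0
--         if i < len(avail):
--             results.append(avail.pop(i))
--         else:
--             results.append(top)
--     return results
-- ===== Notes on version B (the rewrite author's own statement) =====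
-- stated objective: simpler
-- what changed: Replaces A's disjoint-set next-pointer forest with path compression plus a hand-written binary search by a shrinking sorted list of available cards queried with bisect_right (the greatest card kept as A's reusable ceiling), cutting the code to a third.
import Mathlib
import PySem

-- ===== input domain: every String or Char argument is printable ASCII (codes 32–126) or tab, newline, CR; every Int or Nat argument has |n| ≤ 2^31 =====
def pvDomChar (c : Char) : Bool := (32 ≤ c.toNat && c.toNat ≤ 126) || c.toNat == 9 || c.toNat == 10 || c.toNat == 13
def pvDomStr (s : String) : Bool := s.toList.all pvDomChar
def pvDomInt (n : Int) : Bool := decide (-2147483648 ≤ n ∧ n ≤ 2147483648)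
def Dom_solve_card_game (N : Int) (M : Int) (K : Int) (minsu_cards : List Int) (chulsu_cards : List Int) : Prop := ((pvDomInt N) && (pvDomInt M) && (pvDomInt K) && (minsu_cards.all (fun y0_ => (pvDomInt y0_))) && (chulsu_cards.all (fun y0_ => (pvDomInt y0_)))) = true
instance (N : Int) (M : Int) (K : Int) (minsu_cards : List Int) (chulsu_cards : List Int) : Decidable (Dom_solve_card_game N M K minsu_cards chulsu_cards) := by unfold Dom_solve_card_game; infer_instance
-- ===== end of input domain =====

-- B replaces A's disjoint-set-with-path-compression next-pointer forest (plus a hand-written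
-- binary search) by a shrinking sorted list of available cards with bisect_right; simpler, same result.

-- ===== PORT A =====
-- DisjointSet.find with path compression; the fuel only makes the recursion structural
-- (parent chains strictly increase on every reachable state, so fuel n+1 is never exhausted).
def dsFind (parent : List Int) (x : Int) : Nat → List Int × Int
  | 0 => (parent, x)
  | fuel+1 =>
    let px := PySem.List.pyGetD parent x 0          -- self.parent[x]
    if px ≠ x then
      let r := dsFind parent px fuel                -- self.find(self.parent[x])
      (PySem.List.pySetD r.1 x r.2, r.2)            -- self.parent[x] = …; return self.parent[x]
    else (parent, x)

-- DisjointSet.union: CPython evaluates the RHS self.find(y) before the target index self.find(x)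
def dsUnion (parent : List Int) (x y : Int) (fuel : Nat) : List Int :=
  let ry := dsFind parent y fuel
  let rx := dsFind ry.1 x fuel
  PySem.List.pySetD rx.1 rx.2 ry.2

-- the while loop of binary_search; fuel arr.length + 2 suffices (right - left shrinks each pass)
def bsearchLoop (arr : List Int) (target : Int) (left right : Int) : Nat → Int
  | 0 => left
  | fuel+1 =>
    if left ≤ right then
      let mid := PySem.Int.floordiv (left + right) 2
      if PySem.List.pyGetD arr mid 0 ≤ target then bsearchLoop arr target (mid + 1) right fuel
      else bsearchLoop arr target left (mid - 1) fuel
    else left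

def binary_search (arr : List Int) (target : Int) : Int :=
  bsearchLoop arr target 0 (PySem.List.len arr - 1) (arr.length + 2)

-- the body of A's for loop (state = (disjoint_set.parent, results))
def solveStepA (cards : List Int) (n : Nat) (st : List Int × List Int) (q : Int) : List Int × List Int :=
  let index := binary_search cards q
  if index < PySem.List.len cards then
    let fr := dsFind st.1 index (n + 1)
    let card := PySem.List.pyGetD cards fr.2 0
    let p' := if fr.2 + 1 < PySem.List.len cards then dsUnion fr.1 fr.2 (fr.2 + 1) (n + 1) else fr.1
    (p', st.2 ++ [card])
  else
    let fr := dsFind st.1 0 (n + 1)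
    let card := PySem.List.pyGetD cards fr.2 0
    let p' := if fr.2 + 1 < PySem.List.len cards then dsUnion fr.1 fr.2 (fr.2 + 1) (n + 1) else fr.1
    (p', st.2 ++ [card])

def solve_card_game (N : Int) (M : Int) (K : Int) (minsu_cards : List Int) (chulsu_cards : List Int) : List Int :=
  let cards := PySem.List.sorted (PySem.Set.ofList minsu_cards) (fun x => x)
  -- card_indices is built by A but never read; it has no effect and is omitted
  let n := cards.length
  let parent0 : List Int := PySem.List.pyRange 0 ((n : Int) + 1) 1   -- list(range(n + 1))
  (chulsu_cards.foldl (solveStepA cards n) (parent0, [])).2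

-- ===== PORT B =====
-- the body of B's for loop (state = (avail, results)); bisect.bisect_right is PySem.List.bisectRight
def solveStepB (top : Option Int) (st : List Int × List Int) (q : Int) : List Int × List Int :=
  let i : Nat := match top with
    | some t => if q < t then PySem.List.bisectRight st.1 q else 0
    | none => 0            -- Python's 'q < None' raises TypeError here; such inputs are outside Pre_
  if i < st.1.length then (st.1.eraseIdx i, st.2 ++ [st.1.getD i 0])   -- avail.pop(i)
  else (st.1, st.2 ++ [match top with | some t => t | none => 0])      -- append top

def solve_card_game_alt (N : Int) (M : Int) (K : Int) (minsu_cards : List Int) (chulsu_cards : List Int) : List Int :=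
  let cards := PySem.List.sorted (PySem.Set.ofList minsu_cards) (fun x => x)
  let top : Option Int := cards.getLast?          -- cards[-1] if cards else None
  let avail0 := cards.dropLast                    -- cards[:-1]
  (chulsu_cards.foldl (solveStepB top) (avail0, [])).2

-- ===== PRECONDITION & SPEC =====
-- Pre_ excludes only the inputs on which A raises: minsu_cards empty while queries exist
-- (then cards is empty and A's cards[root] is an IndexError; B raises there too).
def Pre_solve_card_game (N : Int) (M : Int) (K : Int) (minsu_cards : List Int) (chulsu_cards : List Int) : Prop :=
  minsu_cards ≠ [] ∨ chulsu_cards = []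
instance (N : Int) (M : Int) (K : Int) (minsu_cards : List Int) (chulsu_cards : List Int) : Decidable (Pre_solve_card_game N M K minsu_cards chulsu_cards) := by unfold Pre_solve_card_game; infer_instance

def pvWitness_solve_card_game : Int × Int × Int × List Int × List Int := (3, 2, 4, [1, 5, 3], [2, 6, 2, 4])

def Spec_solve_card_game (N : Int) (M : Int) (K : Int) (minsu_cards : List Int) (chulsu_cards : List Int) (out : List Int) : Prop := out = solve_card_game_alt N M K minsu_cards chulsu_cards
instance (N : Int) (M : Int) (K : Int) (minsu_cards : List Int) (chulsu_cards : List Int) (out : List Int) : Decidable (Spec_solve_card_game N M K minsu_cards chulsu_cards out) := by unfold Spec_solve_card_game; infer_instance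

-- ===== CLAIM (what is proved, stated in full; the proofs are below) =====
def Claim_equal_solve_card_game : Prop := ∀ (N : Int) (M : Int) (K : Int) (minsu_cards : List Int) (chulsu_cards : List Int), Dom_solve_card_game N M K minsu_cards chulsu_cards → Pre_solve_card_game N M K minsu_cards chulsu_cards → Spec_solve_card_game N M K minsu_cards chulsu_cards (solve_card_game N M K minsu_cards chulsu_cards)


-- ===== LEMMAS AND PROOFS =====

-- j-th card (proof-side shorthand)
def cOf (cards : List Int) (j : Nat) : Int := cards.getD j 0

-- the unused non-maximum card indices, ascending
def UOf (n : Nat) (used : List Nat) : List Nat :=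
  (List.range (n - 1)).filter (fun j => decide (j ∉ used))

def availOf (cards : List Int) (n : Nat) (used : List Nat) : List Int :=
  (UOf n used).map (cOf cards)

-- r is the first index ≥ x that is not yet consumed
def IsNF (used : List Nat) (x r : Nat) : Prop :=
  x ≤ r ∧ r ∉ used ∧ ∀ y, x ≤ y → y < r → y ∈ used

-- every consumed index is < n - 1
def UOK (n : Nat) (used : List Nat) : Prop := ∀ u ∈ used, u + 1 < n

-- invariant on A's parent array: unconsumed entries are self-loops, consumed entries point
-- strictly forward, at most to n - 1, skipping only consumed indices
def PInv (n : Nat) (used : List Nat) (parent : List Int) : Prop :=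
  parent.length = n + 1 ∧ parent.getD n 0 = (n : Int) ∧
  ∀ j : Nat, j < n →
    if j ∈ used then
      ((j : Int) < parent.getD j 0 ∧ parent.getD j 0 ≤ (n : Int) - 1 ∧
        ∀ y : Nat, (j : Int) < (y : Int) → (y : Int) < parent.getD j 0 → y ∈ used)
    else parent.getD j 0 = (j : Int)

lemma isNF_exists (n : Nat) (used : List Nat) (hU : UOK n used) (x : Nat) (hx : x < n) :
    ∃ r, IsNF used x r ∧ r ≤ n - 1 := by
  have hP : ∃ k, (x + k) ∉ used := by
    refine ⟨n - 1 - x, fun hmem => ?_⟩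
    have := hU _ hmem
    omega
  let k := Nat.find hP
  refine ⟨x + k, ⟨Nat.le_add_right _ _, Nat.find_spec hP, fun y hxy hyk => ?_⟩, ?_⟩
  · have h2 : ¬ (x + (y - x)) ∉ used := Nat.find_min hP (by omega)
    have : x + (y - x) = y := by omega
    rw [this] at h2
    exact not_not.mp h2
  · have : k ≤ n - 1 - x := Nat.find_min' hP (by intro hmem; have := hU _ hmem; omega)
    omega

lemma dsFind_succ (parent : List Int) (x : Int) (fuel : Nat) :
    dsFind parent x (fuel + 1) = if PySem.List.pyGetD parent x 0 ≠ x then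
      (PySem.List.pySetD (dsFind parent (PySem.List.pyGetD parent x 0) fuel).1 x
        (dsFind parent (PySem.List.pyGetD parent x 0) fuel).2,
       (dsFind parent (PySem.List.pyGetD parent x 0) fuel).2)
    else (parent, x) := rfl

lemma getD_set_eq (q : List Int) (x j : Nat) (v : Int) (hx : x < q.length) :
    (q.set x v).getD j 0 = if x = j then v else q.getD j 0 := by
  rw [List.getD_eq_getElem?_getD, List.getElem?_set, List.getD_eq_getElem?_getD]
  by_cases h : x = j
  · rw [if_pos h, if_pos hx, if_pos h]; rfl
  · rw [if_neg h, if_neg h]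

-- setting a consumed entry to its root (path compression) or to the next root (union)
-- preserves the invariant
lemma pinv_set (n : Nat) (used : List Nat) (q : List Int) (x r : Nat) (hP : PInv n used q)
    (hx : x < n) (hxr : x < r) (hr : r < n)
    (hskip : ∀ y : Nat, x < y → y < r → y ∈ used) (hrnotused : x ∈ used ∨ r ∉ used) :
    PInv n (if x ∈ used then used else x :: used) (q.set x (r : Int)) := by
  obtain ⟨hlen, hnent, hj⟩ := hP
  have hxlen : x < q.length := by omega
  refine ⟨by rw [List.length_set]; exact hlen, ?_, ?_⟩
  · rw [getD_set_eq q x n _ hxlen, if_neg (by omega)]; exact hnent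
  · intro j hjn
    have hmem : j ∈ (if x ∈ used then used else x :: used) ↔ (j ∈ used ∨ j = x) := by
      split
      · constructor
        · exact fun h => Or.inl h
        · rintro (h | rfl)
          · exact h
          · assumption
      · simp [List.mem_cons, or_comm]
    rw [getD_set_eq q x j _ hxlen]
    by_cases hjx : x = j
    · subst hjx
      rw [if_pos rfl, if_pos (hmem.mpr (Or.inr rfl))]
      refine ⟨by exact_mod_cast hxr, by omega, ?_⟩
      intro y hy1 hy2
      have h1 : x < y := by exact_mod_cast hy1
      have h2 : y < r := by exact_mod_cast hy2
      have := hskip y h1 h2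
      split
      · exact this
      · exact List.mem_cons_of_mem _ this
    · rw [if_neg hjx]
      have hbase := hj j hjn
      by_cases hju : j ∈ used
      · rw [if_pos hju] at hbase
        rw [if_pos (hmem.mpr (Or.inl hju))]
        obtain ⟨b1, b2, b3⟩ := hbase
        refine ⟨b1, b2, fun y hy1 hy2 => ?_⟩
        have := b3 y hy1 hy2
        split
        · exact this
        · exact List.mem_cons_of_mem _ this
      · rw [if_neg hju] at hbase
        by_cases hjm : j ∈ (if x ∈ used then used else x :: used)
        · exfalso
          rcases hmem.mp hjm with h | h
          · exact hju h
          · exact hjx h.symm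
        · rw [if_neg hjm]
          exact hbase

lemma dsFind_spec (n : Nat) (used : List Nat) :
    ∀ (fuel : Nat) (parent : List Int) (x r : Nat), PInv n used parent → x < n → r < n →
      IsNF used x r → n - x < fuel →
      (dsFind parent (x : Int) fuel).2 = (r : Int) ∧ PInv n used (dsFind parent (x : Int) fuel).1 := by
  intro fuel
  induction fuel with
  | zero => intro parent x r _ hx _ _ hf; omega
  | succ fuel ih =>
    intro parent x r hP hx hr hNF hf
    obtain ⟨hlen, hnent, hj⟩ := hP
    have hx' := hj x hx
    rw [dsFind_succ, PySem.List.pyGetD_natCast]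
    by_cases hxu : x ∈ used
    · rw [if_pos hxu] at hx'
      obtain ⟨h1, h2, h3⟩ := hx'
      have he : parent.getD x 0 = ((parent.getD x 0).toNat : Int) := by omega
      set p := (parent.getD x 0).toNat with hpdef
      have hxp : x < p := by omega
      have hpn : p < n := by omega
      have hNFp : IsNF used p r := by
        obtain ⟨ha, hb, hc⟩ := hNF
        have hpr : p ≤ r := by
          by_contra hcon
          have hxrlt : x < r := by
            rcases Nat.lt_or_ge x r with h | h
            · exact h
            · have : r = x := by omega
              exact absurd (this ▸ hxu) hb
          exact hb (h3 r (by exact_mod_cast hxrlt) (by omega))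
        exact ⟨hpr, hb, fun y hy1 hy2 => hc y (by omega) hy2⟩
      have hIH := ih parent p r ⟨hlen, hnent, hj⟩ hpn hr hNFp (by omega)
      rw [he]
      rw [if_pos (by exact_mod_cast (by omega : p ≠ x))]
      obtain ⟨hv, hPI⟩ := hIH
      refine ⟨hv, ?_⟩
      rw [hv, PySem.List.pySetD_natCast]
      have hxlt : x < (dsFind parent (p : Int) fuel).1.length := by
        obtain ⟨hl, _, _⟩ := hPI; omega
      have hres := pinv_set n used (dsFind parent (p : Int) fuel).1 x r hPI hx
        (by -- x < r
          rcases Nat.lt_or_ge x r with h | h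
          · exact h
          · have hxr := hNF.1
            have : r = x := by omega
            exact absurd (this ▸ hxu) hNF.2.1)
        hr (fun y hy1 hy2 => hNF.2.2 y (by omega) hy2) (Or.inl hxu)
      rw [if_pos hxu] at hres
      exact hres
    · rw [if_neg hxu] at hx'
      rw [hx', if_neg (by simp)]
      have hrx : r = x := by
        obtain ⟨ha, hb, hc⟩ := hNF
        by_contra hcon
        exact hxu (hc x le_rfl (by omega))
      exact ⟨by rw [hrx], hlen, hnent, hj⟩

lemma dsUnion_spec (n : Nat) (used : List Nat) (parent : List Int) (root r2 : Nat)
    (hP : PInv n used parent) (hroot : root ∉ used) (hrn : root + 1 < n) (hr2 : r2 < n)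
    (hNF : IsNF used (root + 1) r2) :
    PInv n (root :: used) (dsUnion parent (root : Int) ((root : Int) + 1) (n + 1)) := by
  have hcast : (root : Int) + 1 = ((root + 1 : Nat) : Int) := by omega
  have h1 := dsFind_spec n used (n + 1) parent (root + 1) r2 hP (by omega) hr2 hNF (by omega)
  obtain ⟨hv1, hP1⟩ := h1
  have hNFroot : IsNF used root root := ⟨le_rfl, hroot, fun y hy1 hy2 => absurd hy1 (by omega)⟩
  have h2 := dsFind_spec n used (n + 1) (dsFind parent ((root + 1 : Nat) : Int) (n + 1)).1 root root
    hP1 (by omega) (by omega) hNFroot (by omega)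
  obtain ⟨hv2, hP2⟩ := h2
  show PInv n (root :: used)
    (PySem.List.pySetD _ _ _)
  rw [hcast, hv1, hv2, PySem.List.pySetD_natCast]
  have hres := pinv_set n used _ root r2 hP2 (by omega) (by have := hNF.1; omega) hr2
    (fun y hy1 hy2 => hNF.2.2 y (by omega) hy2) (Or.inr hNF.2.1)
  rw [if_neg hroot] at hres
  exact hres

lemma bsearchLoop_eq (arr : List Int) (q : Int) (hs : arr.Pairwise (· ≤ ·)) :
    ∀ (fuel : Nat) (left right : Int), 0 ≤ left →
      left ≤ (PySem.List.bisectRight arr q : Int) →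
      (PySem.List.bisectRight arr q : Int) ≤ right + 1 →
      right ≤ (arr.length : Int) - 1 → right - left < (fuel : Int) →
      bsearchLoop arr q left right fuel = (PySem.List.bisectRight arr q : Int) := by
  obtain ⟨hble, hlo, hhi⟩ := PySem.List.bisectRight_spec arr q hs
  intro fuel
  induction fuel with
  | zero =>
    intro left right h0 h1 h2 h3 h4
    unfold bsearchLoop
    omega
  | succ fuel ih =>
    intro left right h0 h1 h2 h3 h4
    unfold bsearchLoop
    by_cases hlr : left ≤ right
    · rw [if_pos hlr]
      show (if PySem.List.pyGetD arr (PySem.Int.floordiv (left + right) 2) 0 ≤ q then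
              bsearchLoop arr q (PySem.Int.floordiv (left + right) 2 + 1) right fuel
            else bsearchLoop arr q left (PySem.Int.floordiv (left + right) 2 - 1) fuel)
          = (PySem.List.bisectRight arr q : Int)
      obtain ⟨hm1, hm2⟩ := PySem.Int.floordiv_two_mid_bounds hlr
      set mid := PySem.Int.floordiv (left + right) 2 with hmid
      have hmid0 : 0 ≤ mid := le_trans h0 hm1
      have hmidlen : mid.toNat < arr.length := by omega
      rw [PySem.List.pyGetD_eq_getElem arr (i := mid) 0 hmid0 (by omega)]
      by_cases hcmp : arr[mid.toNat] ≤ q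
      · rw [if_pos hcmp]
        have hblt : (mid : Int) < (PySem.List.bisectRight arr q : Int) := by
          by_contra hcon
          have : PySem.List.bisectRight arr q ≤ mid.toNat := by omega
          exact absurd hcmp (not_le.mpr (hhi mid.toNat hmidlen this))
        exact ih (mid + 1) right (by omega) (by omega) h2 h3 (by omega)
      · rw [if_neg hcmp]
        have hble2 : (PySem.List.bisectRight arr q : Int) ≤ mid := by
          by_contra hcon
          have : mid.toNat < PySem.List.bisectRight arr q := by omega
          exact hcmp (hlo mid.toNat hmidlen this)
        exact ih left (mid - 1) h0 h1 (by omega) (by omega) (by omega)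
    · rw [if_neg hlr]
      omega

lemma binary_search_eq (arr : List Int) (q : Int) (hs : arr.Pairwise (· ≤ ·)) :
    binary_search arr q = (PySem.List.bisectRight arr q : Int) := by
  obtain ⟨hle, _, _⟩ := PySem.List.bisectRight_spec arr q hs
  unfold binary_search
  rw [PySem.List.len_eq]
  exact bsearchLoop_eq arr q hs (arr.length + 2) 0 ((arr.length : Int) - 1)
    le_rfl (by positivity) (by omega) (by omega) (by omega)

-- position of a minimal element of a sorted list
lemma sorted_head_eq {V : List Nat} {r : Nat} (hs : V.Pairwise (· < ·)) (hm : r ∈ V)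
    (hmin : ∀ u ∈ V, r ≤ u) : V[0]? = some r := by
  cases V with
  | nil => simp at hm
  | cons a t =>
    have ha : r ≤ a := hmin a (List.mem_cons_self)
    rcases List.mem_cons.mp hm with rfl | hmt
    · rfl
    · have := (List.pairwise_cons.mp hs).1 r hmt
      omega

-- erasing the (unique) occurrence of r
lemma eraseIdx_eq_filter {V : List Nat} {k : Nat} {r : Nat} (hnd : V.Nodup)
    (hk : V[k]? = some r) : V.eraseIdx k = V.filter (fun u => decide (u ≠ r)) := by
  induction V generalizing k with
  | nil => simp at hk
  | cons a t ih =>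
    cases k with
    | zero =>
      simp only [List.getElem?_cons_zero, Option.some.injEq] at hk
      subst hk
      have hnotin : a ∉ t := (List.nodup_cons.mp hnd).1
      simp only [List.eraseIdx_cons_zero, List.filter_cons]
      rw [if_neg (by simp), List.filter_eq_self.mpr]
      intro b hb
      simp only [decide_eq_true_eq]
      intro hba; exact hnotin (hba ▸ hb)
    | succ k =>
      simp only [List.getElem?_cons_succ] at hk
      have hmem : r ∈ t := by
        rcases List.getElem?_eq_some_iff.mp hk with ⟨h1, h2⟩
        exact h2 ▸ List.getElem_mem h1
      have hne : a ≠ r := fun h => (List.nodup_cons.mp hnd).1 (h ▸ hmem)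
      simp only [List.eraseIdx_cons_succ, List.filter_cons,
        (by simp [hne] : decide (a ≠ r) = true), if_pos]
      rw [ih (List.nodup_cons.mp hnd).2 hk]

-- bisectRight finds the position of r when everything below r maps ≤ q and the rest maps > q
lemma bisect_finds {V : List Nat} {c : Nat → Int} {q : Int} {r : Nat}
    (hs : V.Pairwise (· < ·)) (hms : (V.map c).Pairwise (· ≤ ·)) (hm : r ∈ V)
    (hlow : ∀ u ∈ V, u < r → c u ≤ q) (hhigh : ∀ u ∈ V, r ≤ u → q < c u) :
    PySem.List.bisectRight (V.map c) q < (V.map c).length ∧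
      V[PySem.List.bisectRight (V.map c) q]? = some r := by
  obtain ⟨hle, hlo, hhi⟩ := PySem.List.bisectRight_spec (V.map c) q hms
  rcases List.mem_iff_getElem.mp hm with ⟨k, hk, hVk⟩
  have hVlt := List.pairwise_iff_getElem.mp hs
  have hklen : k < (V.map c).length := by simpa using hk
  set i := PySem.List.bisectRight (V.map c) q with hi
  have hik : i = k := by
    rcases Nat.lt_trichotomy i k with hlt | heq | hgt
    · -- q < (map c)[i] by spec, but V[i] < r so c V[i] ≤ q
      have h1 := hhi i (by omega) le_rfl
      have h2 : V[i] < r := hVk ▸ hVlt i k (by omega) hk hlt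
      have h3 := hlow V[i] (List.getElem_mem (by omega)) h2
      rw [List.getElem_map] at h1
      omega
    · exact heq
    · -- (map c)[k] ≤ q by spec, but r ≤ V[k] so q < c V[k]
      have h1 := hlo k hklen hgt
      have h3 := hhigh V[k] (List.getElem_mem hk) (by omega)
      rw [List.getElem_map, hVk] at h1
      rw [hVk] at h3
      omega
  constructor
  · omega
  · rw [hik, List.getElem?_eq_getElem hk, hVk]

lemma bisect_full {V : List Nat} {c : Nat → Int} {q : Int}
    (hms : (V.map c).Pairwise (· ≤ ·)) (hall : ∀ u ∈ V, c u ≤ q) :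
    PySem.List.bisectRight (V.map c) q = (V.map c).length := by
  obtain ⟨hle, _hlo, hhi⟩ := PySem.List.bisectRight_spec (V.map c) q hms
  by_contra hne
  have hlt : PySem.List.bisectRight (V.map c) q < (V.map c).length := by omega
  have := hhi _ hlt le_rfl
  have hmem : (V.map c)[PySem.List.bisectRight (V.map c) q] ∈ V.map c := List.getElem_mem hlt
  rcases List.mem_map.mp hmem with ⟨u, hu, he⟩
  have := hall u hu
  omega

lemma U_nodup (n : Nat) (used : List Nat) : (UOf n used).Nodup :=
  (List.Pairwise.filter _ List.pairwise_lt_range).imp (fun h => Nat.ne_of_lt h)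

lemma avail_erase (cards : List Int) (n : Nat) (used : List Nat) (k r : Nat)
    (hUk : (UOf n used)[k]? = some r) :
    ((UOf n used).map (cOf cards)).eraseIdx k = availOf cards n (r :: used) := by
  rw [List.eraseIdx_map, eraseIdx_eq_filter (U_nodup n used) hUk]
  unfold availOf UOf
  rw [List.filter_filter]
  congr 1
  apply List.filter_congr
  intro j _
  by_cases h1 : j = r <;> by_cases h2 : j ∈ used <;> simp [h1, h2]

-- the per-query step: same answer on both sides, and the state relation is preserved
lemma step_eq (cards : List Int) (hn : 0 < cards.length) (hsort : cards.Pairwise (· < ·))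
    (used : List Nat) (parent : List Int) (hP : PInv cards.length used parent)
    (hU : UOK cards.length used) (q : Int) (res res' : List Int) :
    ∃ ans parent' used',
      solveStepA cards cards.length (parent, res) q = (parent', res ++ [ans]) ∧
      solveStepB cards.getLast? (availOf cards cards.length used, res') q
        = (availOf cards cards.length used', res' ++ [ans]) ∧
      PInv cards.length used' parent' ∧ UOK cards.length used' := by
  have hsle : cards.Pairwise (· ≤ ·) := hsort.imp le_of_lt
  obtain ⟨hble, hlo, hhi⟩ := PySem.List.bisectRight_spec cards q hsle
  set b := PySem.List.bisectRight cards q with hbdef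
  have hlast : cards.getLast? = some (cards.getD (cards.length - 1) 0) := by
    rw [List.getLast?_eq_getElem?, List.getElem?_eq_getElem (by omega),
      List.getD_eq_getElem cards 0 (by omega : cards.length - 1 < cards.length)]
  have hindex : binary_search cards q = (b : Int) := binary_search_eq cards q hsle
  have hmono : ∀ j k : Nat, j < k → k < cards.length → cOf cards j < cOf cards k := by
    intro j k h1 h2
    have := List.pairwise_iff_getElem.mp hsort j k (by omega) h2 h1
    rwa [cOf, cOf, List.getD_eq_getElem cards 0 (by omega), List.getD_eq_getElem cards 0 h2]
  have hUsort : (UOf cards.length used).Pairwise (· < ·) :=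
    List.Pairwise.filter _ List.pairwise_lt_range
  have hUmem : ∀ u, u ∈ UOf cards.length used ↔ u < cards.length - 1 ∧ u ∉ used := by
    intro u; simp [UOf, List.mem_filter, List.mem_range]
  have hmapsorted : ((UOf cards.length used).map (cOf cards)).Pairwise (· ≤ ·) := by
    rw [List.pairwise_map]
    refine hUsort.imp_of_mem ?_
    intro a c ha hc hac
    have hcb := (hUmem c).mp hc
    exact le_of_lt (hmono a c hac (by omega))
  have hgetc : ∀ j : Nat, j < cards.length → PySem.List.pyGetD cards (j : Int) 0 = cOf cards j := by
    intro j hj; rw [PySem.List.pyGetD_natCast, cOf]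
  have havU : availOf cards cards.length used = (UOf cards.length used).map (cOf cards) := rfl
  by_cases hbn : b < cards.length
  · -- normal branch: some card is strictly greater than q
    obtain ⟨r, hNF, hrle⟩ := isNF_exists cards.length used hU b hbn
    have hrn : r < cards.length := by omega
    obtain ⟨hfv, hfP⟩ := dsFind_spec cards.length used (cards.length + 1) parent b r hP hbn hrn
      hNF (by omega)
    have hAcond : (b : Int) < PySem.List.len cards := by
      rw [PySem.List.len_eq]; exact_mod_cast hbn
    have htop : q < cards.getD (cards.length - 1) 0 := by
      rw [List.getD_eq_getElem cards 0 (by omega : cards.length - 1 < cards.length)]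
      exact hhi (cards.length - 1) (by omega) (by omega)
    by_cases hrtop : r + 1 < cards.length
    · -- consume a non-maximal card
      have hrU : r ∈ UOf cards.length used := (hUmem r).mpr ⟨by omega, hNF.2.1⟩
      have hlow : ∀ u ∈ UOf cards.length used, u < r → cOf cards u ≤ q := by
        intro u hu hur
        have hu' := (hUmem u).mp hu
        have hub : u < b := by
          by_contra hcon
          exact hu'.2 (hNF.2.2 u (by omega) hur)
        have := hlo u (by omega) hub
        rwa [cOf, List.getD_eq_getElem cards 0 (by omega)]
      have hhigh : ∀ u ∈ UOf cards.length used, r ≤ u → q < cOf cards u := by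
        intro u hu hru
        have hu' := (hUmem u).mp hu
        have hbr := hNF.1
        have := hhi u (by omega) (by omega)
        rwa [cOf, List.getD_eq_getElem cards 0 (by omega)]
      obtain ⟨hilen, hgetr⟩ := bisect_finds hUsort hmapsorted hrU hlow hhigh
      set i := PySem.List.bisectRight ((UOf cards.length used).map (cOf cards)) q with hidef
      have hiU : i < (UOf cards.length used).length := by simpa using hilen
      have hUir : (UOf cards.length used)[i] = r := by
        have h2 := hgetr
        rw [List.getElem?_eq_getElem hiU] at h2
        exact Option.some.inj h2
      obtain ⟨r2, hNF2, hr2le⟩ := isNF_exists cards.length used hU (r + 1) hrtop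
      refine ⟨cOf cards r, dsUnion (dsFind parent (b : Int) (cards.length + 1)).1 (r : Int)
        ((r : Int) + 1) (cards.length + 1), r :: used, ?_, ?_, ?_, ?_⟩
      · -- A side
        simp only [solveStepA]
        rw [hindex, if_pos hAcond, hfv, hgetc r hrn, PySem.List.len_eq,
          if_pos (by exact_mod_cast hrtop : (r : Int) + 1 < (cards.length : Int))]
      · -- B side
        simp only [solveStepB, hlast, havU]
        rw [if_pos htop, ← hidef, if_pos (by simpa using hilen)]
        rw [avail_erase cards cards.length used i r hgetr]
        congr 2
        rw [List.getD_eq_getElem _ 0 hilen, List.getElem_map, hUir]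
      · -- invariant
        exact dsUnion_spec cards.length used _ r r2 hfP hNF.2.1 hrtop (by omega) hNF2
      · intro u hu
        rcases List.mem_cons.mp hu with rfl | hu'
        · exact hrtop
        · exact hU u hu'
    · -- the answer is the maximal card (never consumed)
      have hreq : r = cards.length - 1 := by omega
      have hall : ∀ u ∈ UOf cards.length used, cOf cards u ≤ q := by
        intro u hu
        have hu' := (hUmem u).mp hu
        have hub : u < b := by
          by_contra hcon
          exact hu'.2 (hNF.2.2 u (by omega) (by omega))
        have := hlo u (by omega) hub
        rwa [cOf, List.getD_eq_getElem cards 0 (by omega)]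
      have hfull := bisect_full hmapsorted hall
      refine ⟨cOf cards r, (dsFind parent (b : Int) (cards.length + 1)).1, used, ?_, ?_, hfP, hU⟩
      · simp only [solveStepA]
        rw [hindex, if_pos hAcond, hfv, hgetc r hrn, PySem.List.len_eq,
          if_neg (by exact_mod_cast hrtop : ¬ ((r : Int) + 1 < (cards.length : Int)))]
      · simp only [solveStepB, hlast, havU]
        rw [if_pos htop, hfull, if_neg (by omega)]
        rw [cOf, hreq]
  · -- fallback branch: q is ≥ every minsu card; restart from the smallest available
    have hbeq : b = cards.length := by omega
    obtain ⟨r, hNF, hrle⟩ := isNF_exists cards.length used hU 0 hn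
    have hrn : r < cards.length := by omega
    obtain ⟨hfv, hfP⟩ := dsFind_spec cards.length used (cards.length + 1) parent 0 r hP hn hrn
      hNF (by omega)
    have hAcond : ¬ ((b : Int) < PySem.List.len cards) := by
      rw [PySem.List.len_eq, hbeq]; omega
    have htop : ¬ (q < cards.getD (cards.length - 1) 0) := by
      rw [List.getD_eq_getElem cards 0 (by omega : cards.length - 1 < cards.length)]
      have := hlo (cards.length - 1) (by omega) (by omega)
      omega
    by_cases hrtop : r + 1 < cards.length
    · -- consume the smallest available (non-maximal) card
      have hrU : r ∈ UOf cards.length used := (hUmem r).mpr ⟨by omega, hNF.2.1⟩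
      have hmin : ∀ u ∈ UOf cards.length used, r ≤ u := by
        intro u hu
        by_contra hcon
        exact ((hUmem u).mp hu).2 (hNF.2.2 u (by omega) (by omega))
      have hhead := sorted_head_eq hUsort hrU hmin
      have hUlen : 0 < (UOf cards.length used).length := by
        cases hQ : UOf cards.length used with
        | nil => rw [hQ] at hhead; simp at hhead
        | cons a t => simp
      obtain ⟨r2, hNF2, hr2le⟩ := isNF_exists cards.length used hU (r + 1) hrtop
      refine ⟨cOf cards r, dsUnion (dsFind parent (0 : Int) (cards.length + 1)).1 (r : Int)
        ((r : Int) + 1) (cards.length + 1), r :: used, ?_, ?_, ?_, ?_⟩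
      · simp only [solveStepA]
        rw [hindex, if_neg hAcond]
        rw [show ((0 : Nat) : Int) = (0 : Int) from rfl] at hfv
        rw [hfv, hgetc r hrn, PySem.List.len_eq,
          if_pos (by exact_mod_cast hrtop : (r : Int) + 1 < (cards.length : Int))]
      · simp only [solveStepB, hlast, havU]
        rw [if_neg htop, if_pos (by simpa using hUlen)]
        rw [avail_erase cards cards.length used 0 r hhead]
        congr 2
        rw [List.getD_eq_getElem _ 0 (by simpa using hUlen), List.getElem_map]
        have hU0 : (UOf cards.length used)[0] = r := by
          have h2 := hhead
          rw [List.getElem?_eq_getElem hUlen] at h2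
          exact Option.some.inj h2
        rw [hU0]
      · exact dsUnion_spec cards.length used _ r r2 hfP hNF.2.1 hrtop (by omega) hNF2
      · intro u hu
        rcases List.mem_cons.mp hu with rfl | hu'
        · exact hrtop
        · exact hU u hu'
    · -- everything but the maximal card is consumed
      have hreq : r = cards.length - 1 := by omega
      have hUnil : UOf cards.length used = [] := by
        unfold UOf
        rw [List.filter_eq_nil_iff]
        intro j hj
        rw [List.mem_range] at hj
        simp only [decide_eq_true_eq, not_not]
        exact hNF.2.2 j (by omega) (by omega)
      refine ⟨cOf cards r, (dsFind parent (0 : Int) (cards.length + 1)).1, used, ?_, ?_, hfP, hU⟩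
      · simp only [solveStepA]
        rw [hindex, if_neg hAcond]
        rw [show ((0 : Nat) : Int) = (0 : Int) from rfl] at hfv
        rw [hfv, hgetc r hrn, PySem.List.len_eq,
          if_neg (by exact_mod_cast hrtop : ¬ ((r : Int) + 1 < (cards.length : Int)))]
      · simp only [solveStepB, hlast, havU]
        rw [if_neg htop, hUnil]
        rw [if_neg (by simp)]
        rw [cOf, hreq]

lemma loop_eq (cards : List Int) (hn : 0 < cards.length) (hsort : cards.Pairwise (· < ·)) :
    ∀ (qs : List Int) (parent : List Int) (used : List Nat) (res : List Int),
      PInv cards.length used parent → UOK cards.length used →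
      (qs.foldl (solveStepA cards cards.length) (parent, res)).2
        = (qs.foldl (solveStepB cards.getLast?) (availOf cards cards.length used, res)).2 := by
  intro qs
  induction qs with
  | nil => intro parent used res _ _; rfl
  | cons q qs ih =>
    intro parent used res hP hU
    obtain ⟨ans, parent', used', hA, hB, hP', hU'⟩ := step_eq cards hn hsort used parent hP hU q res res
    rw [List.foldl_cons, List.foldl_cons, hA, hB]
    exact ih parent' used' (res ++ [ans]) hP' hU' 

lemma pinv_init (n : Nat) : PInv n [] (PySem.List.pyRange 0 ((n : Int) + 1) 1) := by
  have hlen : (PySem.List.pyRange 0 ((n : Int) + 1) 1).length = n + 1 := by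
    rw [PySem.List.length_pyRange_one]; omega
  have hget : ∀ j : Nat, j < n + 1 → (PySem.List.pyRange 0 ((n : Int) + 1) 1).getD j 0 = (j : Int) := by
    intro j hj
    rw [PySem.List.pyRange_one, List.getD_eq_getElem?_getD, List.getElem?_map,
      List.getElem?_range (by omega : j < ((n : Int) + 1 - 0).toNat)]
    simp
  refine ⟨hlen, hget n (by omega), fun j hj => ?_⟩
  rw [if_neg (List.not_mem_nil)]
  exact hget j (by omega)

lemma avail_init (cards : List Int) : availOf cards cards.length [] = cards.dropLast := by
  unfold availOf UOf
  rw [List.filter_eq_self.mpr (by simp)]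
  apply List.ext_getElem
  · simp
  · intro i h1 h2
    simp only [List.getElem_map, List.getElem_range, List.getElem_dropLast]
    have hi : i < cards.length := by simp at h2; omega
    exact (List.getD_eq_getElem cards 0 hi : cOf cards i = _)

lemma cards_sorted_lt (xs : List Int) :
    (PySem.List.sorted (PySem.Set.ofList xs) (fun x => x)).Pairwise (· < ·) := by
  have hle := PySem.List.sorted_pairwise (PySem.Set.ofList xs) (fun x => x)
  have hnd : (PySem.List.sorted (PySem.Set.ofList xs) (fun x => x)).Nodup :=
    ((PySem.List.sorted_perm (PySem.Set.ofList xs) (fun x => x) false).nodup_iff).mpr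
      (PySem.Set.nodup_ofList xs)
  rw [List.pairwise_iff_getElem] at hle ⊢
  intro i j hi hj hij
  have h1 := hle i j hi hj hij
  have h2 := (List.Nodup.getElem_inj_iff hnd (hi := hi) (hj := hj)).not.mpr (by omega)
  exact lt_of_le_of_ne h1 h2

lemma cards_ne_nil {xs : List Int} (h : xs ≠ []) :
    PySem.List.sorted (PySem.Set.ofList xs) (fun x => x) ≠ [] := by
  intro hs
  rw [PySem.List.sorted_eq_nil_iff] at hs
  rcases List.exists_mem_of_ne_nil xs h with ⟨a, ha⟩
  rw [← PySem.Set.mem_ofList] at ha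
  simp [hs] at ha


-- ===== VERDICT (by name: the statement is the Claim_ definition above) =====
theorem solve_card_game_spec : Claim_equal_solve_card_game := by
  intro N M K minsu chulsu _hdom hpre
  unfold Spec_solve_card_game
  rcases eq_or_ne chulsu [] with rfl | hch
  · rfl
  · have hm : minsu ≠ [] := hpre.resolve_right hch
    unfold solve_card_game solve_card_game_alt
    have hsort := cards_sorted_lt minsu
    have hne := cards_ne_nil hm
    have hn : 0 < (PySem.List.sorted (PySem.Set.ofList minsu) (fun x => x)).length :=
      List.length_pos_iff.mpr hne
    have h := loop_eq _ hn hsort chulsu _ [] [] (pinv_init _) (by intro u hu; simp at hu)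
    rw [avail_init] at h
    exact h
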